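-- pv_equiv track=rewrite | github.com/thorntizzle/player-wiki-app | player_wiki/character_importer.py | split_text_blocks
-- ===== SOURCE A (Python) =====
-- def split_text_blocks(section_text: str) -> list[str]:
--     blocks: list[str] = []
--     current: list[str] = []
--     for raw_line in section_text.splitlines():
--         stripped = raw_line.strip()
--         if not stripped:
--             if current:
--                 current.append("")
--             continue
--         current.append(stripped)
--     if current:
--         blocks.append("\n".join(current).strip())
--     return [block for block in blocks if block]
-- ===== SOURCE B (Python) =====
-- def split_text_blocks(section_text: str) -> list[str]:
--     lines = [line.strip() for line in section_text.splitlines()]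
--     while lines and not lines[0]:
--         del lines[0]
--     while lines and not lines[-1]:
--         del lines[-1]
--     return ["\n".join(lines)] if lines else []
-- ===== Notes on version B (the rewrite author's own statement) =====
-- stated objective: simpler
-- what changed: A builds the block in one stateful pass with a blank-line guard, leading-blank skipping and a final strip of the joined string; B instead strips every line, trims blank lines off both ends of the LIST with two while loops, and joins directly with no string-level strip at all.
import Mathlib
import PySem

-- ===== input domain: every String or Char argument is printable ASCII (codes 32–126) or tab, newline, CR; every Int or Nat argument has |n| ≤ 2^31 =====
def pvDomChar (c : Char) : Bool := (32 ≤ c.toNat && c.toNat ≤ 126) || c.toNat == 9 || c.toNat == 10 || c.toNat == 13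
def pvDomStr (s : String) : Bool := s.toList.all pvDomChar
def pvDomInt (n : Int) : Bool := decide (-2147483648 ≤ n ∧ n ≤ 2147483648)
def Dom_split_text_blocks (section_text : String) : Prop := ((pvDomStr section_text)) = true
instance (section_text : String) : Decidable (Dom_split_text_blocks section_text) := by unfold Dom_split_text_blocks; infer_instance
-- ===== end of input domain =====

-- B replaces A's stateful accumulator loop and final whole-string strip by staged passes:
-- strip every line, trim blank lines off BOTH ENDS OF THE LIST, and join — no string-level strip at all.
-- Objective: simpler (A's blank-line guards and final strip collapse to list trimming).

-- ===== PORT A =====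
-- A's loop body: blank stripped line → append "" only if current is nonempty; else append the stripped line.
def pvStepA (current : List String) (raw_line : String) : List String :=
  let stripped := PySem.Str.strip raw_line
  if stripped = "" then
    (if current ≠ [] then current ++ [""] else current)
  else
    current ++ [stripped]

def split_text_blocks (section_text : String) : List String :=
  let current : List String := (PySem.Str.splitlines section_text).foldl pvStepA []
  let blocks : List String := if current ≠ [] then [PySem.Str.strip (PySem.Str.join "\n" current)] else []
  blocks.filter (fun block => block ≠ "")

-- ===== PORT B =====
-- B's first while loop: `while lines and not lines[0]: del lines[0]`
def pvTrimFront : List String → List String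
  | [] => []
  | l :: t => if l = "" then pvTrimFront t else l :: t

-- B's second while loop: `while lines and not lines[-1]: del lines[-1]`
-- (`lines and not lines[-1]` ⟺ the last element exists and is "")
def pvTrimBack (ls : List String) : List String :=
  if h : ls.getLast? = some "" then pvTrimBack ls.dropLast else ls
termination_by ls.length
decreasing_by
  have hne : ls ≠ [] := by intro e; subst e; simp at h
  have : 0 < ls.length := List.length_pos_iff.mpr hne
  simp [List.length_dropLast]; omega

def split_text_blocks_alt (section_text : String) : List String :=
  let lines := (PySem.Str.splitlines section_text).map PySem.Str.strip
  let trimmed := pvTrimBack (pvTrimFront lines)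
  if trimmed ≠ [] then [PySem.Str.join "\n" trimmed] else []

-- ===== PRECONDITION & SPEC =====
def Spec_split_text_blocks (section_text : String) (out : List String) : Prop := out = split_text_blocks_alt section_text
instance (section_text : String) (out : List String) : Decidable (Spec_split_text_blocks section_text out) := by unfold Spec_split_text_blocks; infer_instance

-- ===== CLAIM =====
def Claim_equal_split_text_blocks : Prop := ∀ (section_text : String), Dom_split_text_blocks section_text → Spec_split_text_blocks section_text (split_text_blocks section_text)

-- ===== LEMMAS AND PROOFS =====

theorem pvStepA_ne_nil (acc : List String) (l : String) (hacc : acc ≠ []) :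
    pvStepA acc l = acc ++ [PySem.Str.strip l] := by
  by_cases h : PySem.Str.strip l = "" <;> simp [pvStepA, h, hacc]

-- A's loop, once the accumulator is nonempty, appends every stripped line (blank ones as "").
theorem foldA_of_ne_nil (ls : List String) : ∀ (acc : List String), acc ≠ [] →
    ls.foldl pvStepA acc = acc ++ ls.map PySem.Str.strip := by
  induction ls with
  | nil => intro acc _; simp
  | cons l t ih =>
    intro acc hacc
    rw [List.foldl_cons, pvStepA_ne_nil acc l hacc, ih _ (by simp)]
    simp

-- A's loop from the empty accumulator drops the leading blank stripped lines.
theorem foldA_nil (ls : List String) :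
    ls.foldl pvStepA [] = (ls.map PySem.Str.strip).dropWhile (· == "") := by
  induction ls with
  | nil => simp
  | cons l t ih =>
    by_cases h : PySem.Str.strip l = ""
    · rw [List.foldl_cons, show pvStepA [] l = [] from by simp [pvStepA, h]]
      rw [ih, List.map_cons, List.dropWhile_cons_of_pos (by simpa using h)]
    · rw [List.foldl_cons, show pvStepA [] l = [PySem.Str.strip l] from by simp [pvStepA, h]]
      rw [foldA_of_ne_nil t [PySem.Str.strip l] (by simp), List.map_cons,
        List.dropWhile_cons_of_neg (by simpa using h)]
      rfl

-- B's while loops are dropWhile from the front resp. from the back.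
theorem trimFront_eq (ls : List String) : pvTrimFront ls = ls.dropWhile (· == "") := by
  induction ls with
  | nil => rfl
  | cons l t ih => by_cases h : l = "" <;> simp [pvTrimFront, h, ih]

theorem trimBack_eq (ls : List String) : pvTrimBack ls = (ls.reverse.dropWhile (· == "")).reverse := by
  induction ls using List.reverseRecOn with
  | nil => rw [pvTrimBack]; simp
  | append_singleton t x ih =>
    rw [pvTrimBack]
    by_cases h : x = ""
    · rw [dif_pos (by rw [List.getLast?_concat, h]), List.dropLast_concat, ih,
        List.reverse_append, h]
      simp
    · rw [dif_neg (by rw [List.getLast?_concat]; simpa using h), List.reverse_append]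
      simp [h]

-- if dropWhile keeps a cons intact, its head fails the predicate
theorem head_false_of_dropWhile_self {α : Type} (p : α → Bool) (c : α) (cs : List α)
    (h : List.dropWhile p (c :: cs) = c :: cs) : p c = false := by
  by_cases hp : p c
  · exfalso
    rw [List.dropWhile_cons_of_pos hp] at h
    have h1 := List.length_dropWhile_le p cs
    rw [h] at h1; simp at h1
  · simpa using hp

-- dropWhile-fixedness passes to prefixes
theorem dropWhile_self_of_prefix {α : Type} (p : α → Bool) {y z : List α}
    (hy : List.dropWhile p y = y) (hz : z <+: y) : List.dropWhile p z = z := by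
  cases z with
  | nil => rfl
  | cons c t =>
    obtain ⟨r, hr⟩ := hz
    have : p c = false := by
      apply head_false_of_dropWhile_self p c (t ++ r)
      rw [show c :: (t ++ r) = (c :: t) ++ r from rfl, hr]; exact hy
    rw [List.dropWhile_cons_of_neg (by simp [this])]

-- PySem.Chars.rstrip x is a prefix of x
theorem rstrip_prefix (x : List Char) : PySem.Chars.rstrip x <+: x := by
  unfold PySem.Chars.rstrip
  have h0 := List.reverse_prefix.mpr (List.dropWhile_suffix (l := x.reverse) (p := PySem.Chars.isspace))
  simpa using h0

theorem lstrip_strip (cs : List Char) : PySem.Chars.lstrip (PySem.Chars.strip cs) = PySem.Chars.strip cs := by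
  unfold PySem.Chars.strip PySem.Chars.lstrip
  exact dropWhile_self_of_prefix _ (List.dropWhile_idempotent _ _) (rstrip_prefix _)

theorem rstrip_strip (cs : List Char) : PySem.Chars.rstrip (PySem.Chars.strip cs) = PySem.Chars.strip cs := by
  unfold PySem.Chars.strip PySem.Chars.rstrip
  simp [List.dropWhile_idempotent]

theorem strip_strip (cs : List Char) : PySem.Chars.strip (PySem.Chars.strip cs) = PySem.Chars.strip cs := by
  rw [show PySem.Chars.strip (PySem.Chars.strip cs)
        = PySem.Chars.rstrip (PySem.Chars.lstrip (PySem.Chars.strip cs)) from rfl,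
    lstrip_strip, rstrip_strip]

-- joining one more part on the right
theorem join_append_singleton (sep : List Char) (zs : List (List Char)) (w : List Char) (h : zs ≠ []) :
    PySem.Chars.join sep (zs ++ [w]) = PySem.Chars.join sep zs ++ sep ++ w := by
  induction zs with
  | nil => exact absurd rfl h
  | cons x t ih =>
    cases t with
    | nil => rw [show ([x] ++ [w]) = [x, w] from rfl, PySem.Chars.join_cons_cons,
        PySem.Chars.join_singleton, PySem.Chars.join_singleton]
    | cons y r =>
      rw [show ((x :: y :: r) ++ [w]) = x :: ((y :: r) ++ [w]) from rfl]
      rw [show ((y :: r) ++ [w]) = y :: (r ++ [w]) from rfl, PySem.Chars.join_cons_cons,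
        show y :: (r ++ [w]) = (y :: r) ++ [w] from rfl, ih (by simp), PySem.Chars.join_cons_cons]
      simp

-- reversing a '\n'-join reverses both levels
theorem rev_join (ls : List (List Char)) :
    (PySem.Chars.join ['\n'] ls).reverse = PySem.Chars.join ['\n'] (ls.reverse.map List.reverse) := by
  induction ls with
  | nil => rfl
  | cons a t ih =>
    cases t with
    | nil => simp [PySem.Chars.join_singleton]
    | cons y r =>
      rw [PySem.Chars.join_cons_cons, List.reverse_append, List.reverse_append, ih,
        show (a :: y :: r).reverse = (y :: r).reverse ++ [a] from by simp,
        List.map_append,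
        show List.map List.reverse [a] = [a.reverse] from rfl,
        join_append_singleton _ _ _ (by simp)]
      simp

-- leading-blank lines vanish under lstrip of the join (all parts lstrip-fixed)
theorem lstrip_join (ls : List (List Char))
    (h : ∀ l ∈ ls, List.dropWhile PySem.Chars.isspace l = l) :
    PySem.Chars.lstrip (PySem.Chars.join ['\n'] ls) =
      PySem.Chars.join ['\n'] (ls.dropWhile (· == [])) := by
  induction ls with
  | nil => rfl
  | cons a t ih =>
    by_cases ha : a = []
    · subst ha
      cases t with
      | nil => rfl
      | cons y r =>
        rw [PySem.Chars.join_cons_cons]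
        rw [show (([] : List Char) ++ ['\n'] ++ PySem.Chars.join ['\n'] (y :: r))
              = '\n' :: PySem.Chars.join ['\n'] (y :: r) from by simp]
        rw [List.dropWhile_cons_of_pos (by simp)]
        unfold PySem.Chars.lstrip
        rw [List.dropWhile_cons_of_pos (by decide)]
        exact ih (fun l hl => h l (List.mem_cons_of_mem _ hl))
    · obtain ⟨c, cs, rfl⟩ := List.exists_cons_of_ne_nil ha
      have hc : PySem.Chars.isspace c = false :=
        head_false_of_dropWhile_self _ c cs (h _ (List.mem_cons_self))
      rw [List.dropWhile_cons_of_neg (by simp)]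
      unfold PySem.Chars.lstrip
      cases t with
      | nil => rw [PySem.Chars.join_singleton, List.dropWhile_cons_of_neg (by simp [hc])]
      | cons y r =>
        rw [PySem.Chars.join_cons_cons]
        rw [show ((c :: cs) ++ ['\n'] ++ PySem.Chars.join ['\n'] (y :: r))
              = c :: (cs ++ ['\n'] ++ PySem.Chars.join ['\n'] (y :: r)) from by simp,
          List.dropWhile_cons_of_neg (by simp [hc])]

-- the (· == []) test commutes with List.reverse
theorem pred_rev_eq : (fun x : List Char => x.reverse == ([] : List Char)) = (fun x => x == []) := by
  funext x
  by_cases h : x = [] <;> simp [h]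

-- trailing-blank lines vanish under rstrip of the join (all parts rstrip-fixed)
theorem rstrip_join (ls : List (List Char))
    (h : ∀ l ∈ ls, PySem.Chars.rstrip l = l) :
    PySem.Chars.rstrip (PySem.Chars.join ['\n'] ls) =
      PySem.Chars.join ['\n'] ((ls.reverse.dropWhile (· == [])).reverse) := by
  unfold PySem.Chars.rstrip
  rw [rev_join]
  rw [show List.dropWhile PySem.Chars.isspace (PySem.Chars.join ['\n'] (ls.reverse.map List.reverse))
        = PySem.Chars.lstrip (PySem.Chars.join ['\n'] (ls.reverse.map List.reverse)) from rfl]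
  rw [lstrip_join _ (by
    intro l hl
    simp only [List.mem_map, List.mem_reverse] at hl
    obtain ⟨x, hx, rfl⟩ := hl
    have hx' := h x hx
    unfold PySem.Chars.rstrip at hx'
    exact List.reverse_injective (by simpa using hx'))]
  rw [List.dropWhile_map]
  rw [show ((· == ([] : List Char)) ∘ List.reverse) = (fun x : List Char => x.reverse == []) from rfl,
    pred_rev_eq]
  rw [rev_join]
  simp

-- the String-level (· == "") test matches (· == []) on .toList
theorem pred_toList_eq : ((· == ([] : List Char)) ∘ String.toList) = (fun x : String => x == "") := by
  funext x
  by_cases h : x = ""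
  · simp [h]
  · have hx : x.toList ≠ [] := fun e => h (String.toList_eq_nil_iff.mp e)
    show (x.toList == []) = (x == "")
    rw [beq_false_of_ne hx, beq_false_of_ne h]

-- strip of the join of front-trimmed, individually stripped lines = join of the back-trimmed list
theorem strip_join_eq (cur : List String)
    (hfix : ∀ x ∈ cur, PySem.Str.strip x = x)
    (hhead : cur.dropWhile (· == "") = cur) :
    PySem.Str.strip (PySem.Str.join "\n" cur) =
      PySem.Str.join "\n" ((cur.reverse.dropWhile (· == "")).reverse) := by
  apply String.toList_inj.mp
  rw [PySem.Str.toList_strip, PySem.Str.toList_join, PySem.Str.toList_join]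
  rw [show ("\n" : String).toList = ['\n'] from rfl]
  have hfixC : ∀ x ∈ cur, PySem.Chars.strip x.toList = x.toList := by
    intro x hx
    have h1 := congrArg String.toList (hfix x hx)
    rwa [PySem.Str.toList_strip] at h1
  have hmap : ∀ l ∈ cur.map String.toList, List.dropWhile PySem.Chars.isspace l = l := by
    intro l hl
    simp only [List.mem_map] at hl
    obtain ⟨x, hx, rfl⟩ := hl
    have h1 := lstrip_strip x.toList
    rw [hfixC x hx] at h1
    exact h1
  have hmapR : ∀ l ∈ cur.map String.toList, PySem.Chars.rstrip l = l := by
    intro l hl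
    simp only [List.mem_map] at hl
    obtain ⟨x, hx, rfl⟩ := hl
    have h1 := rstrip_strip x.toList
    rw [hfixC x hx] at h1
    exact h1
  unfold PySem.Chars.strip
  rw [lstrip_join _ hmap, List.dropWhile_map, pred_toList_eq, hhead, rstrip_join _ hmapR]
  congr 1
  rw [← List.map_reverse, List.dropWhile_map, pred_toList_eq, List.map_reverse]

-- a '\n'-join starting with a nonempty part is a nonempty string
theorem join_cons_eq_append (sep : List Char) (x : List Char) (rest : List (List Char)) :
    ∃ z, PySem.Chars.join sep (x :: rest) = x ++ z := by
  cases rest with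
  | nil => exact ⟨[], by simp [PySem.Chars.join_singleton]⟩
  | cons y r =>
    exact ⟨sep ++ PySem.Chars.join sep (y :: r), by rw [PySem.Chars.join_cons_cons]; simp⟩

theorem join_head_ne_empty (d : String) (u : List String) (hd : d ≠ "") :
    PySem.Str.join "\n" (d :: u) ≠ "" := by
  intro hcontra
  have h1 := congrArg String.toList hcontra
  rw [PySem.Str.toList_join] at h1
  obtain ⟨z, hz⟩ := join_cons_eq_append ("\n").toList d.toList (u.map String.toList)
  rw [show (d :: u).map String.toList = d.toList :: u.map String.toList from rfl, hz] at h1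
  simp at h1
  exact hd (String.toList_inj.mp (by simp [h1.1]))

-- back-trimming is a prefix; its head (if any) is the original head
theorem trim_head (cur : List String) (d : String) (u : List String)
    (ht : (cur.reverse.dropWhile (· == "")).reverse = d :: u) :
    cur.head? = some d := by
  have h0 := List.reverse_prefix.mpr (List.dropWhile_suffix (l := cur.reverse) (p := (· == "")))
  have hpref : (cur.reverse.dropWhile (· == "")).reverse <+: cur := by simpa using h0
  rw [ht] at hpref
  obtain ⟨w, hw⟩ := hpref
  rw [← hw]; rfl

-- ===== VERDICT =====
theorem split_text_blocks_spec : Claim_equal_split_text_blocks := by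
  intro s _
  show split_text_blocks s = split_text_blocks_alt s
  unfold split_text_blocks split_text_blocks_alt
  simp only [foldA_nil, trimFront_eq, trimBack_eq]
  set ls := (PySem.Str.splitlines s).map PySem.Str.strip with hls
  set cur := ls.dropWhile (· == "") with hcur
  have hfix : ∀ x ∈ cur, PySem.Str.strip x = x := by
    intro x hx
    have hx' : x ∈ ls := (List.dropWhile_suffix _).subset hx
    rw [hls] at hx'
    simp only [List.mem_map] at hx'
    obtain ⟨y, _, rfl⟩ := hx'
    apply String.toList_inj.mp
    rw [PySem.Str.toList_strip, PySem.Str.toList_strip, strip_strip]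
  have hhead : cur.dropWhile (· == "") = cur := by
    rw [hcur]; exact List.dropWhile_idempotent _ _
  cases hc : cur with
  | nil => simp
  | cons c r =>
    have hcne : (c == "") = false := by
      apply head_false_of_dropWhile_self (· == "") c r
      rw [← hc, hhead]
    rw [hc] at hfix hhead
    rw [if_pos (by simp), List.filter_cons, strip_join_eq (c :: r) hfix hhead]
    cases ht : (((c :: r).reverse.dropWhile (· == "")).reverse) with
    | nil =>
      have hz : PySem.Str.join "\n" ([] : List String) = "" := by
        apply String.toList_inj.mp
        rw [PySem.Str.toList_join]
        simp [PySem.Chars.join_nil]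
      simp [hz]
    | cons d u =>
      have hd : c = d := by simpa using trim_head (c :: r) d u ht
      have hne := join_head_ne_empty d u (by
        intro e; exact absurd (hd.trans e) (by simpa using hcne))
      simp [hne]
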